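-- pv_equiv track=rewrite | github.com/jwu424/Grokking14Patterns | BinarySearch.py | search_min_diff_element
-- ===== SOURCE A (Python) =====
-- def search_min_diff_element(arr, key):
--     if key < arr[0]:
--         return arr[0]
--     n = len(arr)
--     if key > arr[n-1]:
--         return arr[n-1]
--
--     start, end = 0, n - 1
--     while start <= end:
--         mid = start + (end - start)//2
--         if arr[mid] == key:
--             return arr[mid]
--         elif arr[mid] > key:
--             end = mid - 1
--         else:
--             start = mid + 1
--
--     if arr[start] - key < key - arr[end]:
--         return arr[start]
--     return arr[end]
-- ===== SOURCE B (Python) =====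
-- def search_min_diff_element(arr, key):
--     if key < arr[0]:
--         return arr[0]
--     if key > arr[-1]:
--         return arr[-1]
--
--     def search(lo, hi):
--         if lo > hi:
--             # here hi == lo - 1: the search window closed between two neighbours
--             return arr[lo] if arr[lo] - key < key - arr[hi] else arr[hi]
--         mid = lo + (hi - lo) // 2
--         if arr[mid] == key:
--             return arr[mid]
--         if arr[mid] > key:
--             return search(lo, mid - 1)
--         return search(mid + 1, hi)
--
--     return search(0, len(arr) - 1)
-- ===== Notes on version B (the rewrite author's own statement) =====
-- stated objective: alternative
-- what changed: The iterative while-loop with mutable start/end state and a separate post-loop tie-break is replaced by a self-contained recursive divide-and-conquer helper search(lo, hi) whose base case resolves the tie directly; same comparisons in the same order, so identical results.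
import Mathlib
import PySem

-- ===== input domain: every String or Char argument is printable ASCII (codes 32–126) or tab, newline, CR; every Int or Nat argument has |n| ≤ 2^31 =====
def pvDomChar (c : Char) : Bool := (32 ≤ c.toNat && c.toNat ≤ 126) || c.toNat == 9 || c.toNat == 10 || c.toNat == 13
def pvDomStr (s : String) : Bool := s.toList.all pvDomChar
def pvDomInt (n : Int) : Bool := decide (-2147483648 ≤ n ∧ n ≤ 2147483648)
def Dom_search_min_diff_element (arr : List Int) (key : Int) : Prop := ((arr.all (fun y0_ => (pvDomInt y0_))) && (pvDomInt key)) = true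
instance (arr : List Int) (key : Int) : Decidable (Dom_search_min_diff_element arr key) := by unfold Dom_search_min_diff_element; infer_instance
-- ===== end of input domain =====

-- B replaces A's iterative while-loop (mutable start/end + post-loop tie-break) by a
-- recursive divide-and-conquer helper whose base case resolves the tie directly;
-- same comparisons in the same order, so identical return values.

-- ===== PORT A =====
-- the while-loop of A, as a fuel recursion over the mutable state (start, end);
-- .inl v = 'return arr[mid]' inside the loop, .inr (start, end) = normal loop exit.
-- fuel arr.length + 1 never runs out (the window end - start shrinks each step).
def pvALoop (arr : List Int) (key : Int) : Nat → Int → Int → Sum Int (Int × Int)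
  | 0, start, e => Sum.inr (start, e)
  | fuel+1, start, e =>
    if start ≤ e then
      let mid := start + PySem.Int.floordiv (e - start) 2
      let v := PySem.List.pyGetD arr mid 0   -- in range whenever the guards below passed
      if v = key then Sum.inl v
      else if v > key then pvALoop arr key fuel start (mid - 1)
      else pvALoop arr key fuel (mid + 1) e
    else Sum.inr (start, e)

def search_min_diff_element (arr : List Int) (key : Int) : Int :=
  let a0 := PySem.List.pyGetD arr 0 0        -- arr[0]; empty arr (IndexError) excluded by Pre_
  if key < a0 then a0
  else
    let n : Int := arr.length
    let alast := PySem.List.pyGetD arr (n - 1) 0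
    if key > alast then alast
    else
      match pvALoop arr key (arr.length + 1) 0 (n - 1) with
      | Sum.inl v => v
      | Sum.inr (s, e) =>
        if PySem.List.pyGetD arr s 0 - key < key - PySem.List.pyGetD arr e 0 then
          PySem.List.pyGetD arr s 0
        else PySem.List.pyGetD arr e 0

-- ===== PORT B =====
-- B's recursive helper search(lo, hi)
def pvSearch (arr : List Int) (key : Int) (lo hi : Int) : Int :=
  if h : lo > hi then
    let vlo := PySem.List.pyGetD arr lo 0
    let vhi := PySem.List.pyGetD arr hi 0
    if vlo - key < key - vhi then vlo else vhi
  else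
    let mid := lo + PySem.Int.floordiv (hi - lo) 2
    let v := PySem.List.pyGetD arr mid 0
    if v = key then v
    else if v > key then pvSearch arr key lo (mid - 1)
    else pvSearch arr key (mid + 1) hi
termination_by (hi + 1 - lo).toNat
decreasing_by
  · have h2 := PySem.Int.floordiv_eq_ediv_of_pos (a := hi - lo) (b := 2) (by omega)
    omega
  · have h2 := PySem.Int.floordiv_eq_ediv_of_pos (a := hi - lo) (b := 2) (by omega)
    omega

def search_min_diff_element_alt (arr : List Int) (key : Int) : Int :=
  let a0 := PySem.List.pyGetD arr 0 0        -- arr[0]; empty arr (IndexError) excluded by Pre_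
  if key < a0 then a0
  else
    let alast := PySem.List.pyGetD arr (-1) 0    -- arr[-1]
    if key > alast then alast
    else pvSearch arr key 0 ((arr.length : Int) - 1)

-- ===== PRECONDITION & SPEC =====
-- Pre_ excludes only the empty list, on which A raises IndexError at arr[0].
def Pre_search_min_diff_element (arr : List Int) (key : Int) : Prop := arr ≠ []
instance (arr : List Int) (key : Int) : Decidable (Pre_search_min_diff_element arr key) := by unfold Pre_search_min_diff_element; infer_instance
def pvWitness_search_min_diff_element : List Int × Int := ([1, 4, 6, 9], 5)

def Spec_search_min_diff_element (arr : List Int) (key : Int) (out : Int) : Prop := out = search_min_diff_element_alt arr key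
instance (arr : List Int) (key : Int) (out : Int) : Decidable (Spec_search_min_diff_element arr key out) := by unfold Spec_search_min_diff_element; infer_instance

-- ===== CLAIM (what is proved, stated in full; the proofs are below) =====
def Claim_equal_search_min_diff_element : Prop := ∀ (arr : List Int) (key : Int), Dom_search_min_diff_element arr key → Pre_search_min_diff_element arr key → Spec_search_min_diff_element arr key (search_min_diff_element arr key)

-- ===== LEMMAS AND PROOFS =====

-- A's loop followed by its post-loop tie-break computes exactly B's recursive search.
theorem pvLoop_eq_search (arr : List Int) (key : Int) :
    ∀ (fuel : Nat) (lo hi : Int), (hi + 1 - lo).toNat ≤ fuel →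
    (match pvALoop arr key fuel lo hi with
     | Sum.inl v => v
     | Sum.inr (s, e) =>
       if PySem.List.pyGetD arr s 0 - key < key - PySem.List.pyGetD arr e 0 then
         PySem.List.pyGetD arr s 0
       else PySem.List.pyGetD arr e 0)
    = pvSearch arr key lo hi := by
  intro fuel
  induction fuel with
  | zero =>
    intro lo hi hfuel
    have hlt : lo > hi := by omega
    rw [pvSearch]
    simp [pvALoop, hlt]
  | succ fuel ih =>
    intro lo hi hfuel
    by_cases hle : lo ≤ hi
    · have hfd := PySem.Int.floordiv_eq_ediv_of_pos (a := hi - lo) (b := 2) (by omega)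
      rw [pvSearch]
      simp only [pvALoop, if_pos hle, dif_neg (by omega : ¬ lo > hi)]
      set mid := lo + PySem.Int.floordiv (hi - lo) 2 with hmid
      have hb : lo ≤ mid ∧ mid ≤ hi := by omega
      by_cases hv : PySem.List.pyGetD arr mid 0 = key
      · simp [hv]
      · by_cases hgt : PySem.List.pyGetD arr mid 0 > key
        · simp only [if_neg hv, if_pos hgt]
          exact ih lo (mid - 1) (by omega)
        · simp only [if_neg hv, if_neg hgt]
          exact ih (mid + 1) hi (by omega)
    · rw [pvSearch]
      simp [pvALoop, hle, (by omega : lo > hi)]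

-- arr[-1] = arr[len(arr) - 1] on a nonempty list
theorem pvLast_eq (arr : List Int) (h : arr ≠ []) :
    PySem.List.pyGetD arr (-1) 0 = PySem.List.pyGetD arr ((arr.length : Int) - 1) 0 := by
  have hlen : 0 < arr.length := List.length_pos_iff.mpr h
  have h1 := PySem.List.pyGetD_eq_getElem (xs := arr) (i := (arr.length : Int) - 1) (d := 0) (by omega) (by omega)
  have h2 := PySem.List.pyGetD_neg_ofNat arr 1 0 (by omega) (by omega)
  rw [h1, h2]
  congr 1
  omega

-- ===== VERDICT (by name: the statement is the Claim_ definition above) =====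
theorem search_min_diff_element_spec : Claim_equal_search_min_diff_element := by
  intro arr key _ hpre
  unfold Spec_search_min_diff_element search_min_diff_element search_min_diff_element_alt
  simp only
  rw [pvLast_eq arr hpre]
  by_cases h0 : key < PySem.List.pyGetD arr 0 0
  · simp [h0]
  · simp only [if_neg h0]
    by_cases h1 : key > PySem.List.pyGetD arr ((arr.length : Int) - 1) 0
    · simp [h1]
    · simp only [if_neg h1]
      exact pvLoop_eq_search arr key (arr.length + 1) 0 ((arr.length : Int) - 1) (by omega)
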